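-- pv_equiv track=rewrite | github.com/andrewgrassetti/VHH_structural_paratope_clustering_tool | vhh_paratope_clustering/numbering.py | get_cdr_residues
-- ===== SOURCE A (Python) =====
-- IMGT_CDR_RANGES = {
--     "CDR1": (27, 38),
--     "CDR2": (56, 65),
--     "CDR3": (105, 117),
-- }
--
-- def get_cdr_residues(numbered_sequence, scheme="imgt", cdr_definition=None):
--     """Extract CDR residues from a numbered VHH sequence.
--
--     Parameters
--     ----------
--     numbered_sequence : list of tuple
--         Output from ``number_vhh_sequence``: list of
--         (position_tuple, amino_acid) pairs.
--     scheme : str, optional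
--         Numbering scheme used. Default is 'imgt'.
--     cdr_definition : dict, optional
--         Custom CDR definitions mapping CDR names to (start, end) position
--         ranges (inclusive). If None, uses IMGT definitions.
--
--     Returns
--     -------
--     dict
--         Dictionary mapping CDR names ('CDR1', 'CDR2', 'CDR3') to lists of
--         (position_tuple, amino_acid) pairs for residues in each CDR.
--     """
--     if cdr_definition is None:
--         cdr_definition = IMGT_CDR_RANGES
--
--     cdrs = {name: [] for name in cdr_definition}
--
--     for position, amino_acid in numbered_sequence:
--         if amino_acid == "-":
--             continue
--         pos_num = position[0]
--         for cdr_name, (start, end) in cdr_definition.items():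
--             if start <= pos_num <= end:
--                 cdrs[cdr_name].append((position, amino_acid))
--                 break
--
--     return cdrs
-- ===== SOURCE B (Python) =====
-- IMGT_CDR_RANGES = {
--     "CDR1": (27, 38),
--     "CDR2": (56, 65),
--     "CDR3": (105, 117),
-- }
--
-- def get_cdr_residues(numbered_sequence, scheme="imgt", cdr_definition=None):
--     """CDR-outer partition: each CDR in turn takes its residues out of the
--     remaining pool, so first-CDR-wins on overlapping ranges for free."""
--     if cdr_definition is None:
--         cdr_definition = IMGT_CDR_RANGES
--     remaining = [(pos, aa) for pos, aa in numbered_sequence if aa != "-"]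
--     cdrs = {}
--     for name, (start, end) in cdr_definition.items():
--         cdrs[name] = [r for r in remaining if start <= r[0][0] <= end]
--         remaining = [r for r in remaining if not (start <= r[0][0] <= end)]
--     return cdrs
-- ===== Notes on version B (the rewrite author's own statement) =====
-- stated objective: alternative
-- what changed: Replaces A's residue-outer scan (each residue linearly probes the CDR ranges with a break) by a CDR-outer partition: the non-gap residues are filtered once, then each CDR in turn takes its matching residues out of the remaining pool, which gives first-CDR-wins on overlapping ranges by construction.
import Mathlib
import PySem

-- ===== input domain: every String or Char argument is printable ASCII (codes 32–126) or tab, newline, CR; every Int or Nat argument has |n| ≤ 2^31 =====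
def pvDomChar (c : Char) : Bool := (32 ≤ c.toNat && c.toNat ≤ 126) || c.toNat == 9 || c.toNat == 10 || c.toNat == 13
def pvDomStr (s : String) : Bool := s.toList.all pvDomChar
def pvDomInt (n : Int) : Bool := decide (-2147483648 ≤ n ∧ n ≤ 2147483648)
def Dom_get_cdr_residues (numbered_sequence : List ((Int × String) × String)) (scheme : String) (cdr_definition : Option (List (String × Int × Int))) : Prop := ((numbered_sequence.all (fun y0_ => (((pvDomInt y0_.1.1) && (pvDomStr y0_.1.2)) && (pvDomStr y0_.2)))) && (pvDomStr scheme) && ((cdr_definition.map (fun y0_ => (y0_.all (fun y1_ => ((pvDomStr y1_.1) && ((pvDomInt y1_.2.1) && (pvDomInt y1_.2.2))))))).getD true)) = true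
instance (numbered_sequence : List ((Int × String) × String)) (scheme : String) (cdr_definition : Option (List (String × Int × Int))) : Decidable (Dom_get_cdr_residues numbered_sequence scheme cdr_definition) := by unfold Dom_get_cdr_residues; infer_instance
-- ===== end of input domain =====

-- B buckets residues by a CDR-outer partition of the residue pool instead of A's residue-outer
-- scan over the CDR ranges (alternative decomposition, same cost); return value only, no mutation.

-- ===== PORT A =====
def pvIMGT : List (String × Int × Int) :=
  [("CDR1", (27, 38)), ("CDR2", (56, 65)), ("CDR3", (105, 117))]

-- dict append-at-key: Python `cdrs[cdr_name].append(...)`; exact on dicts with unique keys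
-- (the Python argument is a dict, so keys are unique; Pre_ states this for the assoc-list model)
def pvAppendAt (nm : String) (r : (Int × String) × String) :
    List (String × List ((Int × String) × String)) → List (String × List ((Int × String) × String))
  | [] => []
  | (k, v) :: rest => if k = nm then (k, v ++ [r]) :: rest else (k, v) :: pvAppendAt nm r rest

-- A's inner `for cdr_name, (start, end) in cdr_definition.items(): ... break`
def pvInnerA (pos : Int × String) (aa : String)
    (cdrs : List (String × List ((Int × String) × String))) :
    List (String × Int × Int) → List (String × List ((Int × String) × String))
  | [] => cdrs
  | (nm, s, e) :: rest =>
    if s ≤ pos.1 ∧ pos.1 ≤ e then pvAppendAt nm (pos, aa) cdrs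
    else pvInnerA pos aa cdrs rest

def get_cdr_residues (numbered_sequence : List ((Int × String) × String)) (scheme : String) (cdr_definition : Option (List (String × Int × Int))) : List (String × List ((Int × String) × String)) :=
  let cds := cdr_definition.getD pvIMGT
  -- {name: [] for name in cdr_definition} — exact for unique keys (Pre_)
  let init := cds.map (fun c => (c.1, ([] : List ((Int × String) × String))))
  numbered_sequence.foldl
    (fun cdrs r => if r.2 = "-" then cdrs else pvInnerA r.1 r.2 cdrs cds) init

-- ===== PORT B =====
def pvInRange (s e : Int) (r : (Int × String) × String) : Bool :=
  decide (s ≤ r.1.1 ∧ r.1.1 ≤ e)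

-- B's loop: each CDR takes its residues out of the remaining pool
def pvLoopB (rem : List ((Int × String) × String)) :
    List (String × Int × Int) → List (String × List ((Int × String) × String))
  | [] => []
  | (nm, s, e) :: rest =>
    (nm, rem.filter (pvInRange s e)) :: pvLoopB (rem.filter (fun r => ! pvInRange s e r)) rest

def get_cdr_residues_alt (numbered_sequence : List ((Int × String) × String)) (scheme : String) (cdr_definition : Option (List (String × Int × Int))) : List (String × List ((Int × String) × String)) :=
  pvLoopB (numbered_sequence.filter (fun r => r.2 ≠ "-")) (cdr_definition.getD pvIMGT)

-- ===== PRECONDITION & SPEC =====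
-- Pre_ excludes duplicate CDR names in cdr_definition: the Python argument is a dict, which cannot
-- hold duplicate keys, so a duplicate-keyed assoc list is an artefact of the list model of dicts.
def Pre_get_cdr_residues (numbered_sequence : List ((Int × String) × String)) (scheme : String) (cdr_definition : Option (List (String × Int × Int))) : Prop :=
  (((cdr_definition.getD []).map Prod.fst)).Nodup
instance (numbered_sequence : List ((Int × String) × String)) (scheme : String) (cdr_definition : Option (List (String × Int × Int))) : Decidable (Pre_get_cdr_residues numbered_sequence scheme cdr_definition) := by unfold Pre_get_cdr_residues; infer_instance

def pvWitness_get_cdr_residues : (List ((Int × String) × String)) × String × (Option (List (String × Int × Int))) :=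
  ([((28, ""), "A"), ((60, ""), "G"), ((1, ""), "-")], "imgt", none)

def Spec_get_cdr_residues (numbered_sequence : List ((Int × String) × String)) (scheme : String) (cdr_definition : Option (List (String × Int × Int))) (out : List (String × List ((Int × String) × String))) : Prop := out = get_cdr_residues_alt numbered_sequence scheme cdr_definition
instance (numbered_sequence : List ((Int × String) × String)) (scheme : String) (cdr_definition : Option (List (String × Int × Int))) (out : List (String × List ((Int × String) × String))) : Decidable (Spec_get_cdr_residues numbered_sequence scheme cdr_definition out) := by unfold Spec_get_cdr_residues; infer_instance

-- ===== CLAIM (what is proved, stated in full; the proofs are below) =====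
def Claim_equal_get_cdr_residues : Prop := ∀ (numbered_sequence : List ((Int × String) × String)) (scheme : String) (cdr_definition : Option (List (String × Int × Int))), Dom_get_cdr_residues numbered_sequence scheme cdr_definition → Pre_get_cdr_residues numbered_sequence scheme cdr_definition → Spec_get_cdr_residues numbered_sequence scheme cdr_definition (get_cdr_residues numbered_sequence scheme cdr_definition)

-- ===== LEMMAS AND PROOFS =====

-- first CDR range (in cdr_definition order) containing position p, if any
def pvFirstHit (p : Int) : List (String × Int × Int) → Option String
  | [] => none
  | (nm, s, e) :: rest => if s ≤ p ∧ p ≤ e then some nm else pvFirstHit p rest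

lemma pvFirstHit_mem {p : Int} {nm : String} :
    ∀ {cds : List (String × Int × Int)}, pvFirstHit p cds = some nm → nm ∈ cds.map Prod.fst
  | [], h => by simp [pvFirstHit] at h
  | (n, s, e) :: rest, h => by
    by_cases hc : s ≤ p ∧ p ≤ e
    · simp [pvFirstHit, hc] at h; simp [h]
    · simp [pvFirstHit, hc] at h
      exact List.mem_cons_of_mem _ (pvFirstHit_mem h)

lemma pvInnerA_eq (pos : Int × String) (aa : String)
    (cdrs : List (String × List ((Int × String) × String))) :
    ∀ cds, pvInnerA pos aa cdrs cds =
      match pvFirstHit pos.1 cds with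
      | none => cdrs
      | some nm => pvAppendAt nm (pos, aa) cdrs
  | [] => rfl
  | (nm, s, e) :: rest => by
    by_cases hc : s ≤ pos.1 ∧ pos.1 ≤ e
    · simp [pvInnerA, pvFirstHit, hc]
    · simp [pvInnerA, pvFirstHit, hc, pvInnerA_eq pos aa cdrs rest]

lemma pvAppendAt_map (nm : String) (r : (Int × String) × String)
    (f : String → List ((Int × String) × String)) :
    ∀ (cds : List (String × Int × Int)), (cds.map Prod.fst).Nodup →
      pvAppendAt nm r (cds.map (fun c => (c.1, f c.1))) =
      cds.map (fun c => (c.1, if c.1 = nm then f c.1 ++ [r] else f c.1))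
  | [], _ => rfl
  | c :: rest, hnd => by
    simp only [List.map_cons] at hnd
    rcases List.nodup_cons.mp hnd with ⟨hni, hnd'⟩
    by_cases hk : c.1 = nm
    · subst hk
      have htail : rest.map (fun x => (x.1, if x.1 = c.1 then f x.1 ++ [r] else f x.1))
          = rest.map (fun x => (x.1, f x.1)) :=
        List.map_congr_left (fun x hx => by
          have : x.1 ≠ c.1 := fun h => hni (h ▸ List.mem_map_of_mem hx)
          simp [this])
      simp [pvAppendAt, htail]
    · simp [pvAppendAt, hk, pvAppendAt_map nm r f rest hnd']

-- residues of ns selected for key nm: non-gap and first matching range is nm's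
def pvSel (cds : List (String × Int × Int)) (nm : String)
    (ns : List ((Int × String) × String)) : List ((Int × String) × String) :=
  ns.filter (fun r => decide (r.2 ≠ "-") && decide (pvFirstHit r.1.1 cds = some nm))

lemma pvFoldA (cds : List (String × Int × Int)) (hnd : (cds.map Prod.fst).Nodup) :
    ∀ (ns : List ((Int × String) × String)) (f : String → List ((Int × String) × String)),
      ns.foldl (fun cdrs r => if r.2 = "-" then cdrs else pvInnerA r.1 r.2 cdrs cds)
          (cds.map (fun c => (c.1, f c.1))) =
        cds.map (fun c => (c.1, f c.1 ++ pvSel cds c.1 ns))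
  | [], f => by simp [pvSel]
  | r :: ns, f => by
    simp only [List.foldl_cons]
    by_cases hg : r.2 = "-"
    · rw [if_pos hg, pvFoldA cds hnd ns f]
      refine List.map_congr_left (fun c _ => ?_)
      simp [pvSel, hg]
    · rw [if_neg hg, pvInnerA_eq]
      cases hfh : pvFirstHit r.1.1 cds with
      | none =>
        simp only
        rw [pvFoldA cds hnd ns f]
        refine List.map_congr_left (fun c _ => ?_)
        simp [pvSel, hfh]
      | some nm =>
        simp only
        rw [show (r.1, r.2) = r from rfl,
            pvAppendAt_map nm r (fun k => f k) cds hnd,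
            pvFoldA cds hnd ns (fun k => if k = nm then f k ++ [r] else f k)]
        refine List.map_congr_left (fun c _ => ?_)
        by_cases hc : c.1 = nm
        · have hsel : pvSel cds nm (r :: ns) = r :: pvSel cds nm ns := by
            simp [pvSel, List.filter_cons, hg, hfh]
          simp [hc, hsel]
        · have hne : ¬ (nm = c.1) := fun h => hc h.symm
          have hsel : pvSel cds c.1 (r :: ns) = pvSel cds c.1 ns := by
            simp [pvSel, List.filter_cons, hfh, hne]
          simp [hc, hsel]

lemma pvLoopB_eq :
    ∀ (cds : List (String × Int × Int)), (cds.map Prod.fst).Nodup →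
      ∀ rem, pvLoopB rem cds =
        cds.map (fun c => (c.1, rem.filter (fun r => decide (pvFirstHit r.1.1 cds = some c.1))))
  | [], _, rem => rfl
  | (nm, s, e) :: rest, hnd, rem => by
    simp only [List.map_cons] at hnd
    rcases List.nodup_cons.mp hnd with ⟨hni, hnd'⟩
    have hhead : rem.filter (pvInRange s e)
        = rem.filter (fun r => decide (pvFirstHit r.1.1 ((nm, s, e) :: rest) = some nm)) := by
      refine List.filter_congr (fun r _ => ?_)
      by_cases hc : s ≤ r.1.1 ∧ r.1.1 ≤ e
      · simp [pvInRange, pvFirstHit, hc]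
      · have hno : ¬ pvFirstHit r.1.1 rest = some nm := fun h => hni (pvFirstHit_mem h)
        simp [pvInRange, pvFirstHit, hc, hno]
    have htail : ∀ c ∈ rest,
        ((rem.filter (fun r => ! pvInRange s e r)).filter
          (fun r => decide (pvFirstHit r.1.1 rest = some c.1)))
        = rem.filter (fun r => decide (pvFirstHit r.1.1 ((nm, s, e) :: rest) = some c.1)) := by
      intro c hcmem
      have hne : ¬ (nm = c.1) := fun h => hni (h ▸ List.mem_map_of_mem hcmem)
      rw [List.filter_filter]
      refine List.filter_congr (fun r _ => ?_)
      by_cases hc : s ≤ r.1.1 ∧ r.1.1 ≤ e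
      · simp [pvInRange, pvFirstHit, hc, hne]
      · simp [pvInRange, pvFirstHit, hc]
    simp only [pvLoopB, pvLoopB_eq rest hnd' (rem.filter (fun r => ! pvInRange s e r)),
      List.map_cons]
    rw [hhead]
    congr 1
    refine List.map_congr_left (fun c hc => ?_)
    exact congrArg (fun l => (c.1, l)) (htail c hc)

-- ===== VERDICT (by name: the statement is the Claim_ definition above) =====
theorem get_cdr_residues_spec : Claim_equal_get_cdr_residues := by
  intro ns scheme cd _ hpre
  unfold Spec_get_cdr_residues get_cdr_residues get_cdr_residues_alt
  have hnd : ((cd.getD pvIMGT).map Prod.fst).Nodup := by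
    cases cd with
    | none => decide
    | some l => exact hpre
  rw [pvFoldA (cd.getD pvIMGT) hnd ns (fun _ => []),
      pvLoopB_eq (cd.getD pvIMGT) hnd (ns.filter (fun r => r.2 ≠ "-"))]
  refine List.map_congr_left (fun c _ => ?_)
  refine congrArg (fun l => (c.1, l)) ?_
  simp only [pvSel, List.filter_filter]
  refine List.filter_congr (fun r _ => ?_)
  by_cases h1 : r.2 = "-" <;> by_cases h2 : pvFirstHit r.1.1 (cd.getD pvIMGT) = some c.1 <;>
    simp [h1, h2]
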